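-- pv_equiv track=rewrite | github.com/grahamslam/Tensor_math | analyze_extension.py | count_new_vertex_violations
-- ===== SOURCE A (Python) =====
-- from itertools import combinations
--
-- def count_new_vertex_violations(adj_base, conn, n_base):
--     """Count K5s and I5s involving the new vertex."""
--     neighbors = [j for j in range(n_base) if conn[j] == 1]
--     non_neighbors = [j for j in range(n_base) if conn[j] == 0]
--
--     k5 = 0
--     for combo in combinations(neighbors, 4):
--         if all(adj_base[combo[a], combo[b]] == 1 for a in range(4) for b in range(a + 1, 4)):
--             k5 += 1
--
--     i5 = 0
--     for combo in combinations(non_neighbors, 4):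
--         if all(adj_base[combo[a], combo[b]] == 0 for a in range(4) for b in range(a + 1, 4)):
--             i5 += 1
--
--     return k5, i5
-- ===== SOURCE B (Python) =====
-- def count_new_vertex_violations(adj_base, conn, n_base):
--     """Count K5s and I5s involving the new vertex (pruned combination-tree recursion)."""
--     neighbors = [j for j in range(n_base) if conn[j] == 1]
--     non_neighbors = [j for j in range(n_base) if conn[j] == 0]
--
--     def count_k(cands, k, want):
--         # number of k-subsets of cands (increasing) whose pairs all map to `want`
--         if k == 0:
--             return 1
--         if k == 1:
--             return len(cands)
--         if len(cands) < k:
--             return 0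
--         v, rest = cands[0], cands[1:]
--         compatible = [u for u in rest if adj_base[v, u] == want]
--         return count_k(compatible, k - 1, want) + count_k(rest, k, want)
--
--     return count_k(neighbors, 4, 1), count_k(non_neighbors, 4, 0)
-- ===== Notes on version B (the rewrite author's own statement) =====
-- stated objective: alternative
-- what changed: A enumerates every 4-combination of the (non-)neighbor list and tests all 6 pairs; B counts pairwise-compatible 4-subsets by a pruned head recursion that filters the candidate list to the head's compatible successors and recurses (choose-head + skip-head), cutting incompatible branches early.
-- outside the precondition, e.g. on count_new_vertex_violations({(0, 1): 0}, [1, 1, 1, 1], 4): A returns (0, 0), B raises KeyError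
import Mathlib
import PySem

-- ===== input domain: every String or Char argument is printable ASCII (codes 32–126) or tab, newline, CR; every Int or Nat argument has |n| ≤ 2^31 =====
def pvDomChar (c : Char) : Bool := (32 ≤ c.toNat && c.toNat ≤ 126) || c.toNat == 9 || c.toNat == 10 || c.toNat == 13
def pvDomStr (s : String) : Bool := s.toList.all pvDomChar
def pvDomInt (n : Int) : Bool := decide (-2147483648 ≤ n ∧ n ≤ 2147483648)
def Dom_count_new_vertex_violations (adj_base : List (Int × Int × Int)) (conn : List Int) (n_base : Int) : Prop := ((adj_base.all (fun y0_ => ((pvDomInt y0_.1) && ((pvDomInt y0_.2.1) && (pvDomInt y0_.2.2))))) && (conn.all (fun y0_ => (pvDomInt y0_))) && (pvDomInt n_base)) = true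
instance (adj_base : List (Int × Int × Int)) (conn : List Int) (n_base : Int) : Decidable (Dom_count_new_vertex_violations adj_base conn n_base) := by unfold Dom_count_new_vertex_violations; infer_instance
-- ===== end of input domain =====

-- ===== PORT A =====
-- B replaces A's enumeration of all 4-combinations by a pruned choose-head/skip-head recursion (objective: alternative).
-- dict lookup adj_base[(i,j)]: first match on the (i,j) key components of the association list
def pvLookup (adj : List (Int × Int × Int)) (i j : Int) : Option Int :=
  (adj.find? (fun t => t.1 == i && t.2.1 == j)).map (fun t => t.2.2)

-- adj_base[(i,j)] == w; the default -1 is only reached outside Pre_ (Python raises KeyError there)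
def pvP (adj : List (Int × Int × Int)) (w : Int) (i j : Int) : Bool :=
  (pvLookup adj i j).getD (-1) == w

-- itertools.combinations as lists, in itertools' order
def pvCombos : Nat → List Int → List (List Int)
  | 0, _ => [[]]
  | _+1, [] => []
  | k+1, x :: xs => (pvCombos k xs).map (fun c => x :: c) ++ pvCombos (k+1) xs

-- all(p(c[a], c[b]) for a in range(len) for b in range(a+1, len))
def pvAllPairs (p : Int → Int → Bool) : List Int → Bool
  | [] => true
  | x :: xs => xs.all (p x) && pvAllPairs p xs

def count_new_vertex_violations (adj_base : List (Int × Int × Int)) (conn : List Int) (n_base : Int) : Int × Int :=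
  let neighbors := (PySem.List.pyRange 0 n_base 1).filter (fun j => PySem.List.pyGetD conn j 0 == 1)
  let non_neighbors := (PySem.List.pyRange 0 n_base 1).filter (fun j => PySem.List.pyGetD conn j 0 == 0)
  let k5 := (pvCombos 4 neighbors).foldl
    (fun acc c => if pvAllPairs (pvP adj_base 1) c then acc + 1 else acc) (0 : Int)
  let i5 := (pvCombos 4 non_neighbors).foldl
    (fun acc c => if pvAllPairs (pvP adj_base 0) c then acc + 1 else acc) (0 : Int)
  (k5, i5)

-- ===== PORT B =====
-- count_k from Source B: number of k-subsets of cands whose pairs all map to `want`, head recursion with pruning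
def pvCountK (adj : List (Int × Int × Int)) : Nat → Int → List Int → Int
  | 0, _, _ => 1
  | 1, _, cands => (cands.length : Int)
  | k+2, want, cands =>
    if cands.length < k + 2 then 0
    else match cands with
      | [] => 0
      | v :: rest =>
        pvCountK adj (k+1) want (rest.filter (fun u => pvP adj want v u))
          + pvCountK adj (k+2) want rest
termination_by k _ cands => (k, cands.length)
decreasing_by
  · exact Prod.Lex.left _ _ (Nat.lt_succ_self _)
  · exact Prod.Lex.right _ (by simp)

def count_new_vertex_violations_alt (adj_base : List (Int × Int × Int)) (conn : List Int) (n_base : Int) : Int × Int :=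
  let neighbors := (PySem.List.pyRange 0 n_base 1).filter (fun j => PySem.List.pyGetD conn j 0 == 1)
  let non_neighbors := (PySem.List.pyRange 0 n_base 1).filter (fun j => PySem.List.pyGetD conn j 0 == 0)
  (pvCountK adj_base 4 1 neighbors, pvCountK adj_base 4 0 non_neighbors)

-- ===== PRECONDITION & SPEC =====
def pvNbrs (conn : List Int) (n_base : Int) (v : Int) : List Int :=
  (PySem.List.pyRange 0 n_base 1).filter (fun j => PySem.List.pyGetD conn j 0 == v)

def pvHasAllKeys (adj : List (Int × Int × Int)) (L : List Int) : Bool :=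
  L.all (fun i => L.all (fun j => !(i < j : Bool) || (pvLookup adj i j).isSome))

-- Pre_ excludes inputs where Python raises: n_base beyond len(conn) (IndexError), and missing
-- adjacency keys among a (non-)neighbor set of size >= 4 (KeyError). This is slightly narrower than
-- A's exact domain: when A's all(...) short-circuits on an early failing pair it may return despite
-- later keys being absent; those inputs are excluded too (see cites).
def Pre_count_new_vertex_violations (adj_base : List (Int × Int × Int)) (conn : List Int) (n_base : Int) : Prop :=
  n_base ≤ (conn.length : Int)
  ∧ (4 ≤ (pvNbrs conn n_base 1).length → pvHasAllKeys adj_base (pvNbrs conn n_base 1) = true)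
  ∧ (4 ≤ (pvNbrs conn n_base 0).length → pvHasAllKeys adj_base (pvNbrs conn n_base 0) = true)
instance (adj_base : List (Int × Int × Int)) (conn : List Int) (n_base : Int) : Decidable (Pre_count_new_vertex_violations adj_base conn n_base) := by unfold Pre_count_new_vertex_violations; infer_instance

def pvWitness_count_new_vertex_violations : (List (Int × Int × Int)) × List Int × Int :=
  ([(0, 1, 1), (0, 2, 1), (0, 3, 1), (1, 2, 1), (1, 3, 1), (2, 3, 1)], [1, 1, 1, 1], 4)

def Spec_count_new_vertex_violations (adj_base : List (Int × Int × Int)) (conn : List Int) (n_base : Int) (out : Int × Int) : Prop := out = count_new_vertex_violations_alt adj_base conn n_base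
instance (adj_base : List (Int × Int × Int)) (conn : List Int) (n_base : Int) (out : Int × Int) : Decidable (Spec_count_new_vertex_violations adj_base conn n_base out) := by unfold Spec_count_new_vertex_violations; infer_instance

-- ===== CLAIM (what is proved, stated in full; the proofs are below) =====
def Claim_equal_count_new_vertex_violations : Prop := ∀ (adj_base : List (Int × Int × Int)) (conn : List Int) (n_base : Int), Dom_count_new_vertex_violations adj_base conn n_base → Pre_count_new_vertex_violations adj_base conn n_base → Spec_count_new_vertex_violations adj_base conn n_base (count_new_vertex_violations adj_base conn n_base)

-- ===== LEMMAS AND PROOFS =====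

theorem pvCombos_nil_of_pos (k : Nat) (hk : 0 < k) : pvCombos k [] = [] := by
  cases k with
  | zero => omega
  | succ k => rfl

theorem pvCombos_eq_nil_of_short : ∀ (xs : List Int) (k : Nat), xs.length < k → pvCombos k xs = [] := by
  intro xs
  induction xs with
  | nil => intro k hk; exact pvCombos_nil_of_pos k (by simpa using hk)
  | cons x xs ih =>
    intro k hk
    cases k with
    | zero => simp at hk
    | succ k =>
      simp only [pvCombos]
      rw [ih k (by simp at hk; omega), ih (k+1) (by simp at hk; omega)]
      simp

theorem pvCombos_one (xs : List Int) : pvCombos 1 xs = xs.map (fun x => [x]) := by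
  induction xs with
  | nil => rfl
  | cons x xs ih => simp [pvCombos, ih]

theorem pvCombos_filter (q : Int → Bool) : ∀ (xs : List Int) (k : Nat),
    pvCombos k (xs.filter q) = (pvCombos k xs).filter (fun c => c.all q) := by
  intro xs
  induction xs with
  | nil => intro k; cases k <;> simp [pvCombos]
  | cons x xs ih =>
    intro k
    cases k with
    | zero => simp [pvCombos]
    | succ k =>
      by_cases hq : q x
      · simp only [List.filter_cons, hq, if_pos, pvCombos, ih k, ih (k+1),
          List.filter_append, List.filter_map]
        congr 1
        congr 1
        exact List.filter_congr (fun c _ => by simp [hq])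
      · simp only [List.filter_cons, hq, if_neg, Bool.false_eq_true, not_false_iff, pvCombos,
          ih (k+1), List.filter_append, List.filter_map]
        have : (pvCombos k xs).filter ((fun c => c.all q) ∘ (fun c => x :: c)) = [] := by
          apply List.filter_eq_nil_iff.mpr
          intro c _
          simp [hq]
        rw [this]
        simp

theorem pvAllPairs_singleton (p : Int → Int → Bool) (x : Int) : pvAllPairs p [x] = true := by
  simp [pvAllPairs]

theorem pvCountK_eq_countP (adj : List (Int × Int × Int)) (want : Int) :
    ∀ (n : Nat) (cands : List Int), cands.length ≤ n → ∀ (k : Nat),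
      pvCountK adj k want cands
        = ((pvCombos k cands).countP (fun c => pvAllPairs (pvP adj want) c) : Int) := by
  intro n
  induction n with
  | zero =>
    intro cands hc k
    have hnil : cands = [] := List.length_eq_zero_iff.mp (Nat.le_zero.mp hc)
    subst hnil
    match k with
    | 0 => simp [pvCountK, pvCombos, pvAllPairs]
    | 1 => simp [pvCountK, pvCombos]
    | k+2 => simp [pvCountK, pvCombos]
  | succ n ih =>
    intro cands hc k
    match k with
    | 0 => simp [pvCountK, pvCombos, pvAllPairs]
    | 1 =>
      rw [pvCombos_one]
      simp [pvCountK, List.countP_map, Function.comp_def, pvAllPairs_singleton, List.countP_true]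
    | k+2 =>
      by_cases hshort : cands.length < k + 2
      · rw [pvCombos_eq_nil_of_short cands (k+2) hshort]
        rw [pvCountK.eq_def]
        simp [hshort]
      · match cands with
        | [] => simp at hshort
        | v :: rest =>
          have hrest : rest.length ≤ n := by simp at hc; omega
          have hfilt : (rest.filter (fun u => pvP adj want v u)).length ≤ n :=
            le_trans (List.length_filter_le _ _) hrest
          simp only [pvCountK, if_neg hshort]
          rw [ih _ hfilt (k+1), ih rest hrest (k+2)]
          simp only [pvCombos, List.countP_append]
          push_cast
          congr 1
          rw [pvCombos_filter, List.countP_filter, List.countP_map]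
          congr 1
          apply List.countP_congr
          intro c _
          simp [pvAllPairs, Bool.and_comm]

theorem pvFoldl_count (P : List Int → Bool) (l : List (List Int)) :
    l.foldl (fun acc c => if P c then acc + 1 else acc) (0 : Int) = (l.countP P : Int) := by
  have h : ∀ (l : List (List Int)) (a : Int),
      l.foldl (fun acc c => if P c then acc + 1 else acc) a = a + (l.countP P : Int) := by
    intro l
    induction l with
    | nil => intro a; simp
    | cons c l ihl =>
      intro a
      simp only [List.foldl_cons, List.countP_cons]
      by_cases hP : P c
      · rw [if_pos hP, ihl]; simp [hP]; ring
      · rw [if_neg hP, ihl]; simp [hP]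
  rw [h]; simp

-- ===== VERDICT (by name: the statement is the Claim_ definition above) =====
theorem count_new_vertex_violations_spec : Claim_equal_count_new_vertex_violations := by
  intro adj_base conn n_base _ _
  unfold Spec_count_new_vertex_violations count_new_vertex_violations count_new_vertex_violations_alt
  simp only [Prod.mk.injEq]
  constructor <;>
  · rw [pvFoldl_count, ← pvCountK_eq_countP adj_base _ _ _ (le_refl _) 4]
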